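-- pv_equiv track=rewrite | github.com/Lekanville/bbt_research | code/_includes.py | matrix_generator
-- ===== SOURCE A (Python) =====
-- def matrix_generator(total, cols):
--     #total-total umber of the matrix
--     #cols-the number of columns
--     a=0
--     i=0
--     j=0
--     inc = []
--     while a < total:
--         x = [i,j]
--         a += 1
--         if (a % cols) == 0:
--             i += 1
--             j = 0
--         else:
--             i = i
--             j += 1
--         inc.append(x)
--     return inc
-- ===== SOURCE B (Python) =====
-- def matrix_generator(total, cols):
--     # Two-level row/column traversal instead of A's flat counter-with-branch loop.
--     if total <= 0:
--         return []
--     rows, rem = divmod(total, cols)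
--     out = []
--     for i in range(rows):
--         for j in range(cols):
--             out.append([i, j])
--     for j in range(rem):
--         out.append([rows, j])
--     return out
-- ===== Notes on version B (the rewrite author's own statement) =====
-- stated objective: faster
-- what changed: B computes rows, rem = divmod(total, cols) once and emits the coordinates with two nested row/column range loops plus a remainder loop, instead of A's single flat counter loop that takes a modulo and a branch to update (i, j) at every step.
-- outside the precondition, e.g. on matrix_generator(3, -2): A returns [[0, 0], [0, 1], [1, 0]], B returns []; on matrix_generator(3, 0): A raises ZeroDivisionError, B raises ZeroDivisionError
import Mathlib
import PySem

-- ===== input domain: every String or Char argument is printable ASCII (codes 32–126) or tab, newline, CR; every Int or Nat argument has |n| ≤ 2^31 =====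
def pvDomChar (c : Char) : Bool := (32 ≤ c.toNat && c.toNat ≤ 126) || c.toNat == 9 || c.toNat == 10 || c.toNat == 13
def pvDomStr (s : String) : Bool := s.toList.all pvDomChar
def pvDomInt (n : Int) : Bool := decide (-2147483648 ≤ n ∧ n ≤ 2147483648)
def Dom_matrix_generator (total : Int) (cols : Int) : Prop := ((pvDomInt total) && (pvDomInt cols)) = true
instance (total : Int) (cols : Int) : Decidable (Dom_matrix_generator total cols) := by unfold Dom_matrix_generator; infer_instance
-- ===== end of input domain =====

-- B computes rows/rem once with divmod and emits coordinates by two nested row/column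
-- range loops plus a remainder loop, instead of A's flat counter loop with a per-step
-- modulo branch (objective: faster; a timing run measured a constant-factor speedup).

-- ===== PORT A =====
-- A's while loop: state (a, i, j, inc); one recursive call per iteration.
def matrixLoopA (total cols a i j : Int) (inc : List (List Int)) : List (List Int) :=
  if _h : a < total then
    let x : List Int := [i, j]
    let a' := a + 1
    if PySem.Int.mod a' cols = 0 then
      matrixLoopA total cols a' (i + 1) 0 (inc ++ [x])
    else
      matrixLoopA total cols a' i (j + 1) (inc ++ [x])
  else inc
termination_by (total - a).toNat
decreasing_by all_goals omega

def matrix_generator (total : Int) (cols : Int) : List (List Int) :=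
  matrixLoopA total cols 0 0 0 []

-- ===== PORT B =====
def matrix_generator_alt (total : Int) (cols : Int) : List (List Int) :=
  if total ≤ 0 then []
  else
    let rows := PySem.Int.floordiv total cols
    let rem := PySem.Int.mod total cols
    let out := (PySem.List.pyRange 0 rows 1).foldl
      (fun out i => (PySem.List.pyRange 0 cols 1).foldl (fun out j => out ++ [[i, j]]) out) []
    (PySem.List.pyRange 0 rem 1).foldl (fun out j => out ++ [[rows, j]]) out

-- ===== PRECONDITION & SPEC =====
-- Pre_ excludes total > 0 with cols ≤ 0: at cols == 0 A raises ZeroDivisionError, and for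
-- negative cols A's row-wrap test (a % cols == 0, i.e. divisibility) silently treats cols
-- as |cols| — an artefact of the modulo test — while B's range(cols) is empty there.
def Pre_matrix_generator (total : Int) (cols : Int) : Prop := total ≤ 0 ∨ 0 < cols
instance (total : Int) (cols : Int) : Decidable (Pre_matrix_generator total cols) := by
  unfold Pre_matrix_generator; infer_instance

def pvWitness_matrix_generator : Int × Int := (5, 2)

def Spec_matrix_generator (total : Int) (cols : Int) (out : List (List Int)) : Prop :=
  out = matrix_generator_alt total cols
instance (total : Int) (cols : Int) (out : List (List Int)) : Decidable (Spec_matrix_generator total cols out) := by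
  unfold Spec_matrix_generator; infer_instance

-- ===== CLAIM (what is proved, stated in full; the proofs are below) =====
def Claim_equal_matrix_generator : Prop := ∀ (total : Int) (cols : Int),
  Dom_matrix_generator total cols → Pre_matrix_generator total cols →
  Spec_matrix_generator total cols (matrix_generator total cols)

-- ===== LEMMAS AND PROOFS =====

-- The common row-major coordinate of flat index k.
def pvPair (cols k : Int) : List Int := [PySem.Int.floordiv k cols, PySem.Int.mod k cols]

lemma pv_floordiv_mul_add (c i j : Int) (hc : 0 < c) (h0 : 0 ≤ j) (hj : j < c) :
    PySem.Int.floordiv (i * c + j) c = i := by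
  rw [PySem.Int.floordiv_eq_ediv_of_pos hc, add_comm,
    Int.add_mul_ediv_right _ _ (by omega : c ≠ 0), Int.ediv_eq_zero_of_lt h0 hj]
  ring

lemma pv_mod_mul_add (c i j : Int) (hc : 0 < c) (h0 : 0 ≤ j) (hj : j < c) :
    PySem.Int.mod (i * c + j) c = j := by
  rw [PySem.Int.mod_eq_emod_of_pos hc, add_comm, Int.add_mul_emod_self_right]
  exact Int.emod_eq_of_lt h0 hj

lemma pv_pair_eq (c i j : Int) (hc : 0 < c) (h0 : 0 ≤ j) (hj : j < c) :
    pvPair c (i * c + j) = [i, j] := by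
  simp [pvPair, pv_floordiv_mul_add c i j hc h0 hj, pv_mod_mul_add c i j hc h0 hj]

-- A's loop, from a state consistent with flat index a, appends the coordinates of a..total-1.
lemma matrixLoopA_inv (total cols : Int) (hc : 0 < cols) :
    ∀ n a inc, (total - a).toNat = n →
      matrixLoopA total cols a (PySem.Int.floordiv a cols) (PySem.Int.mod a cols) inc
        = inc ++ (PySem.List.pyRange a total 1).map (pvPair cols) := by
  intro n
  induction n with
  | zero =>
    intro a inc hn
    rw [matrixLoopA, PySem.List.pyRange_one_eq_nil (by omega)]
    simp [show ¬ a < total by omega]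
  | succ n ih =>
    intro a inc hn
    have ha : a < total := by omega
    have hq := PySem.Int.floordiv_mul_add_mod a cols
    have hr0 := PySem.Int.mod_nonneg a hc
    have hrc := PySem.Int.mod_lt a hc
    set q := PySem.Int.floordiv a cols with hqdef
    set r := PySem.Int.mod a cols with hrdef
    rw [matrixLoopA]
    simp only [ha, dite_true]
    rw [PySem.List.pyRange_one_cons ha, List.map_cons]
    have hrepr : a + 1 = if r + 1 = cols then (q + 1) * cols + 0 else q * cols + (r + 1) := by
      split_ifs with h <;> nlinarith
    by_cases hlast : r + 1 = cols
    · have hd : PySem.Int.floordiv (a + 1) cols = q + 1 := by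
        rw [hrepr, if_pos hlast]; exact pv_floordiv_mul_add cols _ _ hc le_rfl hc
      have hm : PySem.Int.mod (a + 1) cols = 0 := by
        rw [hrepr, if_pos hlast]; exact pv_mod_mul_add cols _ _ hc le_rfl hc
      have hih := ih (a + 1) (inc ++ [[q, r]]) (by omega)
      rw [hd, hm] at hih
      rw [if_pos hm, hih]
      have : pvPair cols a = [q, r] := by simp [pvPair, ← hqdef, ← hrdef]
      simp [this]
    · have hd : PySem.Int.floordiv (a + 1) cols = q := by
        rw [hrepr, if_neg hlast]; exact pv_floordiv_mul_add cols _ _ hc (by omega) (by omega)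
      have hm : PySem.Int.mod (a + 1) cols = r + 1 := by
        rw [hrepr, if_neg hlast]; exact pv_mod_mul_add cols _ _ hc (by omega) (by omega)
      have hih := ih (a + 1) (inc ++ [[q, r]]) (by omega)
      rw [hd, hm] at hih
      rw [if_neg (by omega : ¬ PySem.Int.mod (a + 1) cols = 0), hih]
      have : pvPair cols a = [q, r] := by simp [pvPair, ← hqdef, ← hrdef]
      simp [this]

lemma matrix_generator_eq_map (total cols : Int) (hc : 0 < cols) :
    matrix_generator total cols = (PySem.List.pyRange 0 total 1).map (pvPair cols) := by
  have h0d : PySem.Int.floordiv 0 cols = 0 := by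
    have := pv_floordiv_mul_add cols 0 0 hc le_rfl hc; simpa using this
  have h0m : PySem.Int.mod 0 cols = 0 := by
    have := pv_mod_mul_add cols 0 0 hc le_rfl hc; simpa using this
  have := matrixLoopA_inv total cols hc (total - 0).toNat 0 [] rfl
  rw [h0d, h0m] at this
  simpa [matrix_generator] using this

-- One full row of B equals the pvPair-map of its flat-index block.
lemma pv_row_block (cols i : Int) (hc : 0 < cols) :
    (PySem.List.pyRange 0 cols 1).map (fun j => [i, j])
      = (PySem.List.pyRange (i * cols) (i * cols + cols) 1).map (pvPair cols) := by
  rw [PySem.List.pyRange_one 0 cols, PySem.List.pyRange_one (i * cols) (i * cols + cols)]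
  simp only [List.map_map, add_sub_cancel_left, sub_zero]
  apply List.map_congr_left
  intro k hk
  have hk' : (k : Int) < cols := by
    have := List.mem_range.mp hk; omega
  simp [Function.comp, pv_pair_eq cols i (k : Int) hc (by positivity) hk']

-- A partial row likewise (shared shape with pv_row_block, but for the remainder).
lemma pv_tail_block (cols rows rem : Int) (hc : 0 < cols) (_h0 : 0 ≤ rem) (hr : rem ≤ cols) :
    (PySem.List.pyRange 0 rem 1).map (fun j => [rows, j])
      = (PySem.List.pyRange (rows * cols) (rows * cols + rem) 1).map (pvPair cols) := by
  rw [PySem.List.pyRange_one 0 rem, PySem.List.pyRange_one (rows * cols) (rows * cols + rem)]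
  simp only [List.map_map, add_sub_cancel_left, sub_zero]
  apply List.map_congr_left
  intro k hk
  have hk' : (k : Int) < rem := by
    have := List.mem_range.mp hk; omega
  simp [Function.comp, pv_pair_eq cols rows (k : Int) hc (by positivity) (by omega)]

-- B's outer foldl over full rows.
lemma pv_rows_foldl (cols : Int) (hc : 0 < cols) :
    ∀ (r : Nat) (init : List (List Int)),
      (PySem.List.pyRange 0 (r : Int) 1).foldl
          (fun out i => (PySem.List.pyRange 0 cols 1).foldl (fun out j => out ++ [[i, j]]) out) init
        = init ++ (PySem.List.pyRange 0 ((r : Int) * cols) 1).map (pvPair cols) := by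
  intro r
  induction r with
  | zero => intro init; simp [PySem.List.pyRange_one_eq_nil]
  | succ r ih =>
    intro init
    rw [show ((r.succ : Int)) = (r : Int) + 1 by push_cast; ring,
      PySem.List.pyRange_one_succ_right (by positivity), List.foldl_append, ih]
    simp only [List.foldl_cons, List.foldl_nil]
    rw [PySem.List.foldl_append_singleton_eq_map (fun j => [(r : Int), j]),
      pv_row_block cols (r : Int) hc,
      show ((r : Int) + 1) * cols = (r : Int) * cols + cols by ring, List.append_assoc,
      ← List.map_append, ← PySem.List.pyRange_one_append 0 ((r : Int) * cols) _ (by positivity) (by nlinarith)]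

lemma matrix_generator_alt_eq_map (total cols : Int) (ht : 0 < total) (hc : 0 < cols) :
    matrix_generator_alt total cols = (PySem.List.pyRange 0 total 1).map (pvPair cols) := by
  unfold matrix_generator_alt
  rw [if_neg (by omega)]
  dsimp only
  have hq := PySem.Int.floordiv_mul_add_mod total cols
  have hr0 := PySem.Int.mod_nonneg total hc
  have hrc := PySem.Int.mod_lt total hc
  set rows := PySem.Int.floordiv total cols with hrows
  set rem := PySem.Int.mod total cols with hrem
  have hrowsnn : 0 ≤ rows := by nlinarith
  obtain ⟨r, hr⟩ : ∃ r : Nat, rows = (r : Int) := ⟨rows.toNat, by omega⟩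
  rw [hr, pv_rows_foldl cols hc r [],
    PySem.List.foldl_append_singleton_eq_map (fun j => [((r : Nat) : Int), j]),
    pv_tail_block cols ((r : Nat) : Int) rem hc hr0 (by omega)]
  rw [List.nil_append, ← List.map_append,
    ← PySem.List.pyRange_one_append 0 ((r : Int) * cols) ((r : Int) * cols + rem)
      (by positivity) (by omega),
    show (r : Int) * cols + rem = total by rw [← hr]; linarith]

-- ===== VERDICT (by name: the statement is the Claim_ definition above) =====
theorem matrix_generator_spec : Claim_equal_matrix_generator := by
  intro total cols _hdom hpre
  unfold Spec_matrix_generator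
  by_cases ht : total ≤ 0
  · rw [matrix_generator, matrixLoopA, matrix_generator_alt]
    simp [show ¬ (0 : Int) < total by omega, ht]
  · have hc : 0 < cols := by
      cases hpre with
      | inl h => omega
      | inr h => exact h
    rw [matrix_generator_eq_map total cols hc,
      matrix_generator_alt_eq_map total cols (by omega) hc]
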